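-- pv_equiv track=rewrite | github.com/xiph/opus | dnn/torch/osce/utils/pitch.py | hangover
-- ===== SOURCE A (Python) =====
-- def hangover(lags, num_frames=10):
--     lags = lags.copy()
--     count = 0
--     last_lag = 0
--
--     for i in range(len(lags)):
--         lag = lags[i]
--
--         if lag == 0:
--             if count < num_frames:
--                 lags[i] = last_lag
--                 count += 1
--         else:
--             count = 0
--             last_lag = lag
--
--     return lags
-- ===== SOURCE B (Python) =====
-- def hangover(lags, num_frames=10):
--     lags = lags.copy()
--     n = len(lags)
--     last_lag = 0
--     i = 0
--     while i < n:
--         if lags[i] != 0: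
--             last_lag = lags[i]
--             i += 1
--         else:
--             j = i
--             while j < n and lags[j] == 0:
--                 j += 1
--             end_fill = min(j, i + max(num_frames, 0))
--             for k in range(i, end_fill):
--                 lags[k] = last_lag
--             i = j
--     return lags
-- ===== Notes on version B (the rewrite author's own statement) =====
-- stated objective: alternative
-- what changed: Replaced the flat per-element scan with a running fill counter by a nested run-based pass: an outer walk that records the last nonzero lag and, on each maximal zero run, an inner scan that finds the run's end and fills only its first max(num_frames,0) cells.
import Mathlib
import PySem

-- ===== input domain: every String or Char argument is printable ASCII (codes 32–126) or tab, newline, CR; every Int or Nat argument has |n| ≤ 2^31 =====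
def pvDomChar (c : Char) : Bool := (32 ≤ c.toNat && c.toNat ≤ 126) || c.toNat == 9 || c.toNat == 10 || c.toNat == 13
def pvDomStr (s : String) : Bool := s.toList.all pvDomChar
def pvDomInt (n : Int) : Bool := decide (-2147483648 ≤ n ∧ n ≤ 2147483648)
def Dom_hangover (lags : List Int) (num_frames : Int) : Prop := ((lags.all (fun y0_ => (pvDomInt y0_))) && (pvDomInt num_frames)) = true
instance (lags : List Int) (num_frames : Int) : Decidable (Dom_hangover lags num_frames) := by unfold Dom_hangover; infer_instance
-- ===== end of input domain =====

-- B replaces A's flat per-element scan (running fill counter) by a nested run-based pass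
-- over maximal zero runs; same cost, different decomposition. Both work on a copy of the
-- input, so only the return value is at stake.

-- ===== PORT A =====
-- A's for-loop over indices, state = (mutable list, count, last_lag); lags[i] read via getD
-- (the index is always in range), write via List.set.
def hangover (lags : List Int) (num_frames : Int) : List Int :=
  ((List.range lags.length).foldl
    (fun (st : List Int × Int × Int) i =>
      let lag := st.1.getD i 0
      if lag = 0 then
        if st.2.1 < num_frames then (st.1.set i st.2.2, st.2.1 + 1, st.2.2) else st
      else (st.1, 0, lag))
    (lags, 0, 0)).1

-- ===== PORT B =====
-- outer while-loop of Source B: nonzero head → keep it, update last_lag; zero head → the inner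
-- while-loop takes the whole zero run, the fill for-loop writes last_lag into its first
-- min(run length, max(num_frames,0)) cells, the rest of the run stays 0; then jump past it.
def hangoverB_go (num_frames : Int) : List Int → Int → List Int
  | [], _ => []
  | x :: xs, last_lag =>
    if x = 0 then
      let run := List.takeWhile (fun z => z == 0) (x :: xs)
      let m := min ((max num_frames 0).toNat) run.length
      List.replicate m last_lag ++ List.replicate (run.length - m) 0 ++
        hangoverB_go num_frames (List.dropWhile (fun z => z == 0) xs) last_lag
    else x :: hangoverB_go num_frames xs x
termination_by xs _ => xs.length
decreasing_by
  · exact Nat.lt_succ_of_le (List.length_dropWhile_le _ _)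
  · simp

def hangover_alt (lags : List Int) (num_frames : Int) : List Int :=
  hangoverB_go num_frames lags 0

-- ===== PRECONDITION & SPEC =====
def Spec_hangover (lags : List Int) (num_frames : Int) (out : List Int) : Prop := out = hangover_alt lags num_frames
instance (lags : List Int) (num_frames : Int) (out : List Int) : Decidable (Spec_hangover lags num_frames out) := by unfold Spec_hangover; infer_instance

-- ===== CLAIM (what is proved, stated in full; the proofs are below) =====
def Claim_equal_hangover : Prop := ∀ (lags : List Int) (num_frames : Int), Dom_hangover lags num_frames → Spec_hangover lags num_frames (hangover lags num_frames)

-- ===== LEMMAS AND PROOFS =====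

-- A's loop as a structural recursion over the yet-unprocessed suffix (count, last_lag state).
def aRec (nf : Int) : List Int → Int → Int → List Int
  | [], _, _ => []
  | x :: xs, count, last =>
    if x = 0 then
      if count < nf then last :: aRec nf xs (count + 1) last
      else x :: aRec nf xs count last
    else x :: aRec nf xs 0 x

-- the fold over range', started with i = pre.length on pre ++ suf, never touches pre and
-- acts on suf exactly like aRec
theorem hangover_foldl_eq (nf : Int) (suf : List Int) : ∀ (pre : List Int) (count last : Int),
    ((List.range' pre.length suf.length).foldl
      (fun (st : List Int × Int × Int) i =>
        let lag := st.1.getD i 0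
        if lag = 0 then
          if st.2.1 < nf then (st.1.set i st.2.2, st.2.1 + 1, st.2.2) else st
        else (st.1, 0, lag))
      (pre ++ suf, count, last)).1 = pre ++ aRec nf suf count last := by
  induction suf with
  | nil => intro pre count last; simp [aRec]
  | cons x xs ih =>
    intro pre count last
    rw [List.length_cons, List.range'_succ, List.foldl_cons]
    have hget : (pre ++ x :: xs).getD pre.length 0 = x := by
      simp [List.getD]
    have hset : ∀ v : Int, (pre ++ x :: xs).set pre.length v = (pre ++ [v]) ++ xs := by
      intro v; rw [List.set_append_right _ _ (Nat.le_refl _)]; simp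
    by_cases hx : x = 0
    · subst hx
      by_cases hc : count < nf
      · have := ih (pre ++ [last]) (count + 1) last
        simp only [List.length_append, List.length_cons, List.length_nil,
          Nat.zero_add, List.append_assoc, List.singleton_append] at this
        simp only [hget, if_true, if_pos hc, hset, List.append_assoc,
          List.singleton_append]
        rw [this]
        simp [aRec, hc]
      · have := ih (pre ++ [(0 : Int)]) count last
        simp only [List.length_append, List.length_cons, List.length_nil,
          Nat.zero_add, List.append_assoc, List.singleton_append] at this
        simp only [hget, if_true, if_neg hc]
        rw [this]
        simp [aRec, hc]
    · have := ih (pre ++ [x]) 0 x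
      simp only [List.length_append, List.length_cons, List.length_nil,
        Nat.zero_add, List.append_assoc, List.singleton_append] at this
      simp only [hget, if_neg hx]
      rw [this]
      simp [aRec, hx]

theorem hangover_eq_aRec (lags : List Int) (nf : Int) :
    hangover lags nf = aRec nf lags 0 0 := by
  have := hangover_foldl_eq nf lags [] 0 0
  simpa [hangover, List.range_eq_range'] using this

-- through a block of zeros, aRec fills min((nf-count)⁺, block) cells with last and bumps count
theorem aRec_zero_run (nf : Int) (zs : List Int) : ∀ (rest : List Int) (count last : Int),
    (∀ z ∈ zs, z = 0) →
    aRec nf (zs ++ rest) count last =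
      List.replicate (min (nf - count).toNat zs.length) last ++
      List.replicate (zs.length - min (nf - count).toNat zs.length) 0 ++
      aRec nf rest (count + (min (nf - count).toNat zs.length : Nat)) last := by
  induction zs with
  | nil => intro rest count last _; simp
  | cons z zs ih =>
    intro rest count last hall
    have hz : z = 0 := hall z (List.mem_cons_self)
    by_cases hc : count < nf
    · have harith : min (nf - count).toNat (zs.length + 1) =
          min (nf - (count + 1)).toNat zs.length + 1 := by omega
      simp only [List.cons_append, aRec, hz, if_pos hc]
      rw [ih rest (count + 1) last (fun z hmem => hall z (List.mem_cons_of_mem _ hmem))]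
      rw [List.length_cons, harith, List.replicate_succ]
      have e1 : zs.length + 1 - (min (nf - (count + 1)).toNat zs.length + 1) =
          zs.length - min (nf - (count + 1)).toNat zs.length := by omega
      have e2 : count + ((min (nf - (count + 1)).toNat zs.length + 1 : Nat) : Int) =
          count + 1 + ((min (nf - (count + 1)).toNat zs.length : Nat) : Int) := by
        push_cast; ring
      rw [e1, e2]
      simp
    · have h0 : min (nf - count).toNat (zs.length + 1) = 0 := by omega
      have h0' : min (nf - count).toNat zs.length = 0 := by omega
      simp only [List.cons_append, aRec, hz, if_neg hc]
      rw [ih rest count last (fun z hmem => hall z (List.mem_cons_of_mem _ hmem))]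
      rw [List.length_cons, h0, h0']
      simp [List.replicate_succ]

-- when the remainder starts with a nonzero lag (or is empty), the count is irrelevant
theorem aRec_count_irrel (nf : Int) (rest : List Int)
    (h : rest = [] ∨ ∃ y ys, rest = y :: ys ∧ y ≠ 0) (c c' last : Int) :
    aRec nf rest c last = aRec nf rest c' last := by
  rcases h with h | ⟨y, ys, rfl, hy⟩
  · subst h; simp [aRec]
  · simp [aRec, hy]

theorem aRec_eq_bGo (nf : Int) : ∀ (n : Nat) (xs : List Int), xs.length ≤ n → ∀ (last : Int),
    aRec nf xs 0 last = hangoverB_go nf xs last := by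
  intro n
  induction n with
  | zero =>
    intro xs hlen last
    have : xs = [] := List.eq_nil_of_length_eq_zero (Nat.le_zero.mp hlen)
    subst this; simp [aRec, hangoverB_go]
  | succ n ih =>
    intro xs hlen last
    match xs with
    | [] => simp [aRec, hangoverB_go]
    | x :: xs =>
      by_cases hx : x = 0
      · rw [hangoverB_go, if_pos hx]
        set zs := List.takeWhile (fun z => z == 0) (x :: xs) with hzs
        set rest := List.dropWhile (fun z => z == 0) (x :: xs) with hrest
        have hsplit : zs ++ rest = x :: xs := List.takeWhile_append_dropWhile
        have hall : ∀ z ∈ zs, z = 0 := by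
          intro z hmem
          have := List.mem_takeWhile_imp hmem
          simpa using this
        have hrest_shape : rest = [] ∨ ∃ y ys, rest = y :: ys ∧ y ≠ 0 := by
          cases hr : rest with
          | nil => exact Or.inl rfl
          | cons y ys =>
            refine Or.inr ⟨y, ys, rfl, ?_⟩
            have := List.head?_dropWhile_not (fun z => z == 0) (x :: xs)
            rw [← hrest, hr] at this
            simpa using this
        have hrest_len : rest.length ≤ n := by
          have h1 : rest.length + zs.length = xs.length + 1 := by
            have := congrArg List.length hsplit
            simp at this; omega
          have hzpos : 0 < zs.length := by
            have : List.takeWhile (fun z => z == 0) (x :: xs) = x :: List.takeWhile (fun z => z == 0) xs := by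
              simp [hx]
            rw [hzs, this]; simp
          simp only [List.length_cons] at hlen
          omega
        have hdrop : List.dropWhile (fun z => z == 0) xs = rest := by
          rw [hrest]; simp [hx]
        rw [← hsplit, aRec_zero_run nf zs rest 0 last hall]
        rw [aRec_count_irrel nf rest hrest_shape _ 0 last]
        rw [hdrop]
        have hm : min (nf - 0).toNat zs.length = min (max nf 0).toNat zs.length := by omega
        rw [hm]
        congr 1
        cases hr : rest with
        | nil => simp [aRec, hangoverB_go]
        | cons y ys =>
          obtain ⟨y', ys', heq, hy⟩ := hrest_shape.resolve_left (by simp [hr])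
          rw [hr] at heq; cases heq
          rw [aRec, hangoverB_go, if_neg hy, if_neg hy]
          congr 1
          exact ih ys (by rw [hr] at hrest_len; simp at hrest_len; omega) y
      · rw [aRec, if_neg hx, hangoverB_go, if_neg hx]
        congr 1
        exact ih xs (by simpa using Nat.lt_succ_iff.mp (by simpa using hlen)) x

-- ===== VERDICT (by name: the statement is the Claim_ definition above) =====
theorem hangover_spec : Claim_equal_hangover := by
  intro lags num_frames _
  unfold Spec_hangover hangover_alt
  rw [hangover_eq_aRec]
  exact aRec_eq_bGo num_frames lags.length lags (Nat.le_refl _) 0
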